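-- pv_equiv track=rewrite | github.com/ArbelRivitz/Crossword | crossword.py | search
-- ===== SOURCE A (Python) =====
-- def search(wordslst, strlst):
--     """This function receives the list of words and the list of strings
--     (strings by the different search directions) and returns a list of tuples
--     each containing a word and the number of times it appeared in the search.
--     """
--     word_appearance_list = {}
--     lst = []
--     for word in wordslst:
--         num_of_appearance = 0
--         for string in strlst:
--             if word in string:
--                 num_of_appearance += 1
--                 place = string.find(word)
--                 updated_str = string[place + 1:]
--                 while word in updated_str:  # in case word more than once in
--                     # string we cut the first letter off the string (so we
--                     # don't count the same appearance twice) and check if the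
--                     # word appears again.
--                     place = updated_str.find(word)
--                     updated_str = updated_str[place + 1:]
--                     num_of_appearance += 1
--         if num_of_appearance > 0:  # To eliminate adding words that don't
--             # appear.
--             word_appearance_list.update({word: num_of_appearance})
--     sorted_keys = sorted(word_appearance_list.keys())  # organise the words
--     # alphabetically
--     for index in sorted_keys:
--         lst.append((index, str(word_appearance_list[index])))
--     return lst
-- ===== SOURCE B (Python) =====
-- def search(wordslst, strlst):
--     # Index all substrings of the needed lengths once, then answer each word by lookup.
--     lengths = sorted({len(w) for w in wordslst})
--     counts = {}
--     for s in strlst: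
--         for L in lengths:
--             for i in range(len(s) - L + 1):
--                 win = s[i:i + L]
--                 counts[win] = counts.get(win, 0) + 1
--     found = {}
--     for w in wordslst:
--         c = counts.get(w, 0)
--         if c > 0:
--             found[w] = c
--     return [(w, str(found[w])) for w in sorted(found)]
-- ===== Notes on version B (the rewrite author's own statement) =====
-- stated objective: faster
-- what changed: A rescans every string for every word with find() and repeated prefix-cutting; B builds one counter of all substrings (windows) of the needed lengths in a single pass over strlst and answers each word by a dictionary lookup; Pre_ excludes only inputs with an empty word and nonempty strlst, on which A loops forever.
import Mathlib
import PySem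

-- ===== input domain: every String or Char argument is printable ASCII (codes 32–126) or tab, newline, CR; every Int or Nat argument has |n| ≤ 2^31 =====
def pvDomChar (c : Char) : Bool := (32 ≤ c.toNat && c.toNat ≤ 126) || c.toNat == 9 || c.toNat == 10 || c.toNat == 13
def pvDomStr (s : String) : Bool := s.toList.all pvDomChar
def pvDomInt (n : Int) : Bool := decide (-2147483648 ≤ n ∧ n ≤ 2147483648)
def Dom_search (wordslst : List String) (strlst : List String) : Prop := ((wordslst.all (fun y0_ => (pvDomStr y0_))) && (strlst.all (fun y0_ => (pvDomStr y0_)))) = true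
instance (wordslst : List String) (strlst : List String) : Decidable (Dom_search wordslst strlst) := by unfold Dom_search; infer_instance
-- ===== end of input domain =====

-- B replaces A's per-word find/cut rescans of every string by one substring index (a counter
-- of all windows of the needed lengths) built in a single pass over strlst, answered per word
-- by a dictionary lookup (objective: faster; the per-word rescan of every string disappears).


-- ===== PORT A =====
-- the 'while word in updated_str' loop; fuel = current string length bounds the iteration
-- count (each step drops at least one character), so for word ≠ "" this is exact.
def aWhile (fuel : Nat) (word : List Char) (s : List Char) (n : Int) : Int :=
  match fuel with
  | 0 => n
  | f + 1 =>
    if PySem.Chars.isIn word s then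
      aWhile f word (PySem.List.slice s (some (PySem.Chars.find s word + 1)) none) (n + 1)
    else n

-- the body of 'for string in strlst': one string's contribution to num_of_appearance
def aCountOne (word : List Char) (s : List Char) : Int :=
  if PySem.Chars.isIn word s then
    let place := PySem.Chars.find s word
    let updated := PySem.List.slice s (some (place + 1)) none
    aWhile updated.length word updated 1
  else 0

-- num_of_appearance for one word over all of strlst
def aWordCount (strlst : List String) (word : String) : Int :=
  strlst.foldl (fun n string => n + aCountOne word.toList string.toList) 0

-- word_appearance_list after the 'for word in wordslst' loop
def aDict (wordslst : List String) (strlst : List String) : PySem.Dict String Int :=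
  wordslst.foldl (fun d word =>
    let n := aWordCount strlst word
    if n > 0 then d.insert word n else d) PySem.Dict.empty

def search (wordslst : List String) (strlst : List String) : List (String × String) :=
  (PySem.List.sorted (PySem.Dict.keys (aDict wordslst strlst)) (fun x => x) false).foldl
    (fun lst index => lst ++ [(index, PySem.Int.toStr ((aDict wordslst strlst).getD index 0))]) []

-- ===== PORT B =====
-- sorted({len(w) for w in wordslst})
def bLengths (wordslst : List String) : List Int :=
  PySem.List.sorted (PySem.Set.ofList (wordslst.map PySem.Str.len)) (fun x => x) false

-- counts[win] = counts.get(win, 0) + 1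
def bInsertWin (d : PySem.Dict String Int) (win : String) : PySem.Dict String Int :=
  d.insert win (d.getD win 0 + 1)

-- the body of 'for L in lengths': index every window of s of length L
def bCountString (d : PySem.Dict String Int) (s : String) (L : Int) : PySem.Dict String Int :=
  (PySem.List.pyRange 0 (PySem.Str.len s - L + 1) 1).foldl
    (fun d i => bInsertWin d (PySem.Str.slice s (some i) (some (i + L)))) d

-- counts after the 'for s in strlst' loop
def bCounter (strlst : List String) (lengths : List Int) : PySem.Dict String Int :=
  strlst.foldl (fun d s => lengths.foldl (fun d L => bCountString d s L) d) PySem.Dict.empty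

-- found after the 'for w in wordslst' loop
def bFound (wordslst : List String) (counts : PySem.Dict String Int) : PySem.Dict String Int :=
  wordslst.foldl (fun d w =>
    let c := counts.getD w 0
    if c > 0 then d.insert w c else d) PySem.Dict.empty

def search_alt (wordslst : List String) (strlst : List String) : List (String × String) :=
  (PySem.List.sorted (PySem.Dict.keys (bFound wordslst (bCounter strlst (bLengths wordslst)))) (fun x => x) false).map
    (fun w => (w, PySem.Int.toStr ((bFound wordslst (bCounter strlst (bLengths wordslst))).getD w 0)))

-- ===== PRECONDITION & SPEC =====
-- Pre_ excludes inputs where wordslst contains the empty word while strlst is nonempty: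
-- there A's 'while word in updated_str' loop never terminates (A returns no value).
def Pre_search (wordslst : List String) (strlst : List String) : Prop :=
  "" ∈ wordslst → strlst = []
instance (wordslst : List String) (strlst : List String) : Decidable (Pre_search wordslst strlst) := by unfold Pre_search; infer_instance

def pvWitness_search : List String × List String := (["ab", "b"], ["abab", "xbb"])

def Spec_search (wordslst : List String) (strlst : List String) (out : List (String × String)) : Prop := out = search_alt wordslst strlst
instance (wordslst : List String) (strlst : List String) (out : List (String × String)) : Decidable (Spec_search wordslst strlst out) := by unfold Spec_search; infer_instance

-- ===== CLAIM (what is proved, stated in full; the proofs are below) =====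
def Claim_equal_search : Prop := ∀ (wordslst : List String) (strlst : List String), Dom_search wordslst strlst → Pre_search wordslst strlst → Spec_search wordslst strlst (search wordslst strlst)

-- ===== LEMMAS AND PROOFS =====

def occ (w s : List Char) : Nat := (List.range s.length).countP (fun j => decide (w <+: s.drop j))

theorem prefix_drop_infix (w s : List Char) (j : Nat) (h : w <+: s.drop j) : w <:+: s :=
  h.isInfix.trans (List.drop_suffix j s).isInfix

theorem occ_eq_zero (w s : List Char) (h : ¬ w <:+: s) : occ w s = 0 := by
  unfold occ
  rw [List.countP_eq_zero]
  intro j hj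
  simp only [decide_eq_true_eq]
  exact fun hp => h (prefix_drop_infix w s j hp)

theorem find_lt_length (w s : List Char) (hw : w ≠ []) (hin : w <:+: s) :
    (PySem.Chars.find s w).toNat < s.length := by
  have h0 := (PySem.Chars.find_nonneg_iff s w).mpr hin
  obtain ⟨hpre, -⟩ := PySem.Chars.find_spec h0
  by_contra hge
  rw [List.drop_eq_nil_iff.mpr (by omega)] at hpre
  exact hw (List.prefix_nil.mp hpre)

theorem occ_split (w s : List Char) (hw : w ≠ []) (hin : w <:+: s) :
    occ w s = 1 + occ w (s.drop ((PySem.Chars.find s w).toNat + 1)) := by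
  have h0 := (PySem.Chars.find_nonneg_iff s w).mpr hin
  obtain ⟨hpre, hmin⟩ := PySem.Chars.find_spec h0
  have hp := find_lt_length w s hw hin
  set p := (PySem.Chars.find s w).toNat with hpdef
  have hlen : s.length = (p + 1) + (s.length - (p + 1)) := by omega
  unfold occ
  rw [List.length_drop]
  rw [hlen, List.range_add, List.countP_append, List.range_succ, List.countP_append]
  have h1 : (List.range p).countP (fun j => decide (w <+: s.drop j)) = 0 := by
    rw [List.countP_eq_zero]
    intro j hj
    simp only [decide_eq_true_eq]
    exact hmin j (List.mem_range.mp hj)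
  have h2 : ([p]).countP (fun j => decide (w <+: s.drop j)) = 1 := by
    simp [hpre]
  have h3 : (List.map (fun x => (p + 1) + x) (List.range (s.length - (p + 1)))).countP
      (fun j => decide (w <+: s.drop j))
      = (List.range (s.length - (p + 1))).countP (fun j => decide (w <+: (s.drop (p + 1)).drop j)) := by
    rw [List.countP_map]
    apply List.countP_congr
    intro x hx
    simp only [Function.comp, decide_eq_true_eq]
    rw [List.drop_drop]
  rw [h1, h2, h3, show p + 1 + (s.length - (p + 1)) - (p + 1) = s.length - (p + 1) by omega]

theorem aWhile_eq (w : List Char) (hw : w ≠ []) :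
    ∀ (fuel : Nat) (s : List Char) (n : Int), s.length ≤ fuel →
      aWhile fuel w s n = n + (occ w s : Int) := by
  intro fuel
  induction fuel with
  | zero =>
    intro s n hf
    have hs : s = [] := List.eq_nil_of_length_eq_zero (by omega)
    subst hs
    simp [aWhile, occ]
  | succ f ih =>
    intro s n hf
    by_cases h : PySem.Chars.isIn w s
    · have hin := (PySem.Chars.isIn_iff_infix w s).mp h
      have h0 := (PySem.Chars.find_nonneg_iff s w).mpr hin
      have hp := find_lt_length w s hw hin
      have hslice := PySem.List.slice_from s
        (show (0:Int) ≤ PySem.Chars.find s w + 1 by omega)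
      rw [show (PySem.Chars.find s w + 1).toNat = (PySem.Chars.find s w).toNat + 1 by omega] at hslice
      rw [aWhile, if_pos h, hslice, ih _ (n + 1) (by rw [List.length_drop]; omega),
        occ_split w s hw hin]
      push_cast
      ring
    · rw [aWhile, if_neg h]
      have hz := occ_eq_zero w s ((PySem.Chars.isIn_eq_false_iff w s).mp (by simpa using h))
      simp [hz]

theorem aCountOne_eq (w s : List Char) (hw : w ≠ []) : aCountOne w s = (occ w s : Int) := by
  unfold aCountOne
  by_cases h : PySem.Chars.isIn w s
  · have hin := (PySem.Chars.isIn_iff_infix w s).mp h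
    have h0 := (PySem.Chars.find_nonneg_iff s w).mpr hin
    have hp := find_lt_length w s hw hin
    have hslice := PySem.List.slice_from s
      (show (0:Int) ≤ PySem.Chars.find s w + 1 by omega)
    rw [show (PySem.Chars.find s w + 1).toNat = (PySem.Chars.find s w).toNat + 1 by omega] at hslice
    rw [if_pos h]
    simp only [hslice]
    rw [aWhile_eq w hw _ _ 1 le_rfl, occ_split w s hw hin]
    push_cast
    ring
  · rw [if_neg h]
    have hz := occ_eq_zero w s ((PySem.Chars.isIn_eq_false_iff w s).mp (by simpa using h))
    simp [hz]

def winCount (w s : String) (L : Int) : Nat :=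
  ((PySem.List.pyRange 0 (PySem.Str.len s - L + 1) 1).map
    (fun i => PySem.Str.slice s (some i) (some (i + L)))).count w

theorem foldl_bInsertWin (g : Int → String) (w : String) :
    ∀ (l : List Int) (d : PySem.Dict String Int),
      (l.foldl (fun d i => bInsertWin d (g i)) d).getD w 0 = d.getD w 0 + ((l.map g).count w : Int) := by
  intro l
  induction l with
  | nil => simp
  | cons a tl ih =>
    intro d
    rw [List.foldl_cons, ih, List.map_cons, List.count_cons]
    unfold bInsertWin
    rw [PySem.Dict.getD_insert]
    by_cases hwa : w = g a
    · simp only [hwa, BEq.rfl, if_pos]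
      push_cast
      ring
    · have hba : ¬ ((g a == w) = true) := by simpa using fun he => hwa he.symm
      simp [hwa, hba]

theorem bCountString_getD (d : PySem.Dict String Int) (s : String) (L : Int) (w : String) :
    (bCountString d s L).getD w 0 = d.getD w 0 + (winCount w s L : Int) := by
  unfold bCountString
  exact foldl_bInsertWin (fun i => PySem.Str.slice s (some i) (some (i + L))) w _ d

theorem lengths_fold_getD (s : String) (w : String) :
    ∀ (ls : List Int) (d : PySem.Dict String Int),
      (ls.foldl (fun d L => bCountString d s L) d).getD w 0
        = d.getD w 0 + (ls.map (fun L => (winCount w s L : Int))).sum := by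
  intro ls
  induction ls with
  | nil => simp
  | cons a tl ih =>
    intro d
    rw [List.foldl_cons, ih, bCountString_getD]
    simp [add_assoc]

theorem bCounter_getD (strlst : List String) (lengths : List Int) (w : String) :
    (bCounter strlst lengths).getD w 0
      = (strlst.map (fun s => (lengths.map (fun L => (winCount w s L : Int))).sum)).sum := by
  unfold bCounter
  have key : ∀ (l : List String) (d : PySem.Dict String Int),
      (l.foldl (fun d s => lengths.foldl (fun d L => bCountString d s L) d) d).getD w 0
        = d.getD w 0 + (l.map (fun s => (lengths.map (fun L => (winCount w s L : Int))).sum)).sum := by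
    intro l
    induction l with
    | nil => simp
    | cons a tl ih =>
      intro d
      rw [List.foldl_cons, ih, lengths_fold_getD]
      simp [add_assoc]
  rw [key]
  simp

theorem str_slice_toList (s : String) (a b : Option Int) :
    (PySem.Str.slice s a b).toList = PySem.List.slice s.toList a b := by
  simp [PySem.Str.slice]

theorem winCount_ne (w s : String) (L : Int) (hL : 0 ≤ L) (hne : L ≠ (w.toList.length : Int)) :
    winCount w s L = 0 := by
  unfold winCount
  rw [List.count_eq_zero]
  intro hmem
  obtain ⟨i, hi, heq⟩ := List.mem_map.mp hmem
  obtain ⟨hi0, hiu⟩ := PySem.List.mem_pyRange_one.mp hi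
  rw [PySem.Str.len_eq] at hiu
  have htl := congrArg String.toList heq
  rw [str_slice_toList, PySem.List.slice_toNat s.toList hi0 (by omega)] at htl
  have hlen := congrArg List.length htl
  rw [List.length_take, List.length_drop] at hlen
  omega

theorem winCount_eq_occ (w s : String) (hw : w.toList ≠ []) :
    winCount w s ((w.toList.length : Int)) = occ w.toList s.toList := by
  have hm : 1 ≤ w.toList.length := List.length_pos_of_ne_nil hw
  unfold winCount
  rw [PySem.Str.len_eq]
  by_cases hnm : s.toList.length < w.toList.length
  · have hr : PySem.List.pyRange 0 ((s.toList.length : Int) - (w.toList.length : Int) + 1) 1 = [] := by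
      rw [PySem.List.pyRange_one]
      rw [show (((s.toList.length : Int) - (w.toList.length : Int) + 1) - 0).toNat = 0 by omega]
      simp
    rw [hr]
    simp only [List.map_nil, List.count_nil]
    symm
    unfold occ
    rw [List.countP_eq_zero]
    intro j hj
    simp only [decide_eq_true_eq]
    intro hp
    have := hp.length_le
    rw [List.length_drop] at this
    omega
  · have hnm' : w.toList.length ≤ s.toList.length := by omega
    have hocc : occ w.toList s.toList
        = (List.range (s.toList.length - w.toList.length + 1)).countP
            (fun j => decide (w.toList <+: s.toList.drop j)) := by
      unfold occ
      conv_lhs => rw [show s.toList.length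
        = (s.toList.length - w.toList.length + 1) + (w.toList.length - 1) by omega]
      rw [List.range_add, List.countP_append]
      have h2 : (List.map (fun x => (s.toList.length - w.toList.length + 1) + x)
          (List.range (w.toList.length - 1))).countP
            (fun j => decide (w.toList <+: s.toList.drop j)) = 0 := by
        rw [List.countP_map, List.countP_eq_zero]
        intro x hx
        simp only [Function.comp, decide_eq_true_eq]
        intro hp
        have h1 := hp.length_le
        rw [List.length_drop] at h1
        have := List.mem_range.mp hx
        omega
      rw [h2, Nat.add_zero]
    have hcast : (s.toList.length : Int) - (w.toList.length : Int) + 1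
        = ((s.toList.length - w.toList.length + 1 : Nat) : Int) := by push_cast; omega
    rw [hcast, PySem.List.pyRange_zero_nat, List.map_map, List.count_eq_countP, List.countP_map, hocc]
    apply List.countP_congr
    intro k hk
    have hk' := List.mem_range.mp hk
    simp only [Function.comp, beq_iff_eq, decide_eq_true_eq]
    have hsl : (PySem.Str.slice s (some ((k : Int))) (some ((k : Int) + (w.toList.length : Int)))).toList
        = (s.toList.drop k).take w.toList.length := by
      rw [str_slice_toList, PySem.List.slice_toNat s.toList (by omega) (by omega)]
      rw [show ((k : Int) + (w.toList.length : Int)).toNat - ((k : Int)).toNat = w.toList.length by omega,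
        Int.toNat_natCast]
    constructor
    · intro he
      have htl := congrArg String.toList he
      rw [hsl] at htl
      rw [List.prefix_iff_eq_take]
      exact htl.symm
    · intro hp
      apply String.toList_inj.mp
      rw [hsl]
      exact (List.prefix_iff_eq_take.mp hp).symm

theorem sum_single (g : Int → Int) :
    ∀ (ls : List Int), ls.Nodup → ∀ x, x ∈ ls → (∀ y ∈ ls, y ≠ x → g y = 0) →
      (ls.map g).sum = g x := by
  intro ls
  induction ls with
  | nil => intro _ x hx; exact absurd hx (List.not_mem_nil)
  | cons a tl ih =>
    intro hnd x hx hz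
    obtain ⟨hna, hndtl⟩ := List.nodup_cons.mp hnd
    rcases List.mem_cons.mp hx with rfl | hx'
    · have hztl : (tl.map g).sum = 0 :=
        List.sum_eq_zero (by
          intro v hv
          obtain ⟨y, hy, rfl⟩ := List.mem_map.mp hv
          exact hz y (List.mem_cons_of_mem _ hy) (fun he => hna (he ▸ hy)))
      simp [hztl]
    · have hax : a ≠ x := fun he => hna (he ▸ hx')
      have ha : g a = 0 := hz a List.mem_cons_self hax
      simp [ha, ih hndtl x hx' (fun y hy hne => hz y (List.mem_cons_of_mem _ hy) hne)]

theorem mem_bLengths (wordslst : List String) (w : String) (hw : w ∈ wordslst) :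
    ((w.toList.length : Int)) ∈ bLengths wordslst := by
  unfold bLengths
  rw [PySem.List.mem_sorted, PySem.Set.mem_ofList]
  exact List.mem_map.mpr ⟨w, hw, (PySem.Str.len_eq w).symm⟩

theorem bLengths_nonneg (wordslst : List String) (L : Int) (hL : L ∈ bLengths wordslst) : 0 ≤ L := by
  unfold bLengths at hL
  rw [PySem.List.mem_sorted, PySem.Set.mem_ofList] at hL
  obtain ⟨w', _, rfl⟩ := List.mem_map.mp hL
  rw [PySem.Str.len_eq]
  positivity

theorem bLengths_nodup (wordslst : List String) : (bLengths wordslst).Nodup := by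
  unfold bLengths
  exact (PySem.List.sorted_perm _ _ _).symm.nodup (PySem.Set.nodup_ofList _)

theorem perword (wordslst strlst : List String) (hpre : "" ∈ wordslst → strlst = [])
    (w : String) (hw : w ∈ wordslst) :
    (bCounter strlst (bLengths wordslst)).getD w 0 = aWordCount strlst w := by
  rw [bCounter_getD]
  unfold aWordCount
  rw [PySem.List.foldl_add, zero_add]
  rcases eq_or_ne strlst [] with rfl | hne
  · simp
  · have hw0 : w ≠ "" := fun he => hne (hpre (he ▸ hw))
    have hwl : w.toList ≠ [] := by simpa using hw0
    apply congrArg List.sum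
    apply List.map_congr_left
    intro s hs
    show ((bLengths wordslst).map (fun L => (winCount w s L : Int))).sum
        = aCountOne w.toList s.toList
    have hzs : ∀ y ∈ bLengths wordslst, y ≠ ((w.toList.length : Int)) →
        (fun L => (winCount w s L : Int)) y = 0 := by
      intro y hy hne'
      have hz := winCount_ne w s y (bLengths_nonneg wordslst y hy) hne'
      simp [hz]
    rw [aCountOne_eq _ _ hwl,
      sum_single (fun L => (winCount w s L : Int)) (bLengths wordslst) (bLengths_nodup wordslst)
        ((w.toList.length : Int)) (mem_bLengths wordslst w hw) hzs]
    show ((winCount w s ((w.toList.length : Int)) : Int)) = (occ w.toList s.toList : Int)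
    exact_mod_cast winCount_eq_occ w s hwl

theorem dict_eq (wordslst strlst : List String) (hpre : "" ∈ wordslst → strlst = []) :
    aDict wordslst strlst = bFound wordslst (bCounter strlst (bLengths wordslst)) := by
  unfold aDict bFound
  apply PySem.List.foldl_congr_mem
  intro acc x hx
  show (if aWordCount strlst x > 0 then acc.insert x (aWordCount strlst x) else acc)
      = (if (bCounter strlst (bLengths wordslst)).getD x 0 > 0
          then acc.insert x ((bCounter strlst (bLengths wordslst)).getD x 0) else acc)
  rw [perword wordslst strlst hpre x hx]

-- ===== VERDICT (by name: the statement is the Claim_ definition above) =====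
theorem search_spec : Claim_equal_search := by
  intro wordslst strlst hdom hpre
  unfold Pre_search at hpre
  unfold Spec_search search search_alt
  rw [dict_eq wordslst strlst hpre]
  rw [PySem.List.foldl_append_singleton_eq_map]
  simp
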